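-- pv_equiv track=rewrite | github.com/Ap00rvx/legxAI | legal_xai/api.py | filter_india_links
-- ===== SOURCE A (Python) =====
-- from typing import AsyncGenerator, List, Dict, Any, Optional, Tuple
--
-- INDIA_HOST_HINTS = [
--     ".gov.in", ".nic.in", ".ac.in", ".in/", ".in?", ".in#",
--     "indiankanoon.org", "constitutionofindia.net", "legislative.gov.in",
--     "lawmin.gov.in", "prsindia.org", "supremecourtofindia.nic.in", "districts.ecourts.gov.in",
-- ]
--
-- def is_india_link(u: str) -> bool:
--     ul = u.lower()
--     return any(h in ul for h in INDIA_HOST_HINTS)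
--
-- def filter_india_links(items: List[Dict[str, str]], desired: int) -> List[Dict[str, str]]:
--     # Prefer India-oriented links but fall back to original results to avoid empty lists
--     primary = [it for it in items if is_india_link(it.get("url", ""))]
--     if not primary:
--         return items[:desired]
--     if len(primary) >= desired:
--         return primary[:desired]
--     rest = [it for it in items if it not in primary]
--     return (primary + rest)[:desired]
-- ===== SOURCE B (Python) =====
-- INDIA_HOST_HINTS = [
--     ".gov.in", ".nic.in", ".ac.in", ".in/", ".in?", ".in#",
--     "indiankanoon.org", "constitutionofindia.net", "legislative.gov.in",
--     "lawmin.gov.in", "prsindia.org", "supremecourtofindia.nic.in", "districts.ecourts.gov.in",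
-- ]
--
-- def is_india_link(u: str) -> bool:
--     ul = u.lower()
--     return any(h in ul for h in INDIA_HOST_HINTS)
--
-- def filter_india_links(items, desired):
--     # Stable sort: India links (key False) keep their order and come first; then slice.
--     return sorted(items, key=lambda it: not is_india_link(it.get("url", "")))[:desired]
-- ===== Notes on version B (the rewrite author's own statement) =====
-- stated objective: idiomatic
-- what changed: Replaces the two-filter partition with explicit empty/plentiful fallback branches by a single stable sort on the boolean key 'not is_india_link(url)' followed by one slice.
import Mathlib
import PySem

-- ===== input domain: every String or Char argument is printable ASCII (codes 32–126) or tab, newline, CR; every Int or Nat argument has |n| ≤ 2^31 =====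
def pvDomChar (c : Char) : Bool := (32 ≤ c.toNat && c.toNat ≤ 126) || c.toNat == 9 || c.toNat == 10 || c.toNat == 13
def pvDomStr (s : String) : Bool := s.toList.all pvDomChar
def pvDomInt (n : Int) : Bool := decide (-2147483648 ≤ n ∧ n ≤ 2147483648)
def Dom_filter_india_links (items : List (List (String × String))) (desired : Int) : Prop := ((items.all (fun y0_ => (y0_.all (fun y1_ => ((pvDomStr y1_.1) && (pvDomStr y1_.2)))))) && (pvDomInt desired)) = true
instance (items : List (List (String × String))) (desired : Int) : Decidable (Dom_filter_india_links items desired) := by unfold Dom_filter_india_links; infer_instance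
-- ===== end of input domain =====

-- B replaces A's partition-plus-fallback-branches by one stable sort on a boolean key and one slice (idiomatic, not faster).

-- ===== PORT A =====
def INDIA_HOST_HINTS : List String := [
    ".gov.in", ".nic.in", ".ac.in", ".in/", ".in?", ".in#",
    "indiankanoon.org", "constitutionofindia.net", "legislative.gov.in",
    "lawmin.gov.in", "prsindia.org", "supremecourtofindia.nic.in", "districts.ecourts.gov.in"]

def is_india_link (u : String) : Bool :=
  INDIA_HOST_HINTS.any (fun h => PySem.Str.isIn h (PySem.Str.lower u))

def filter_india_links (items : List (List (String × String))) (desired : Int) : List (List (String × String)) :=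
  let primary := items.filter (fun it => is_india_link (PySem.Dict.getD (PySem.Dict.mk it) "url" ""))
  if primary.isEmpty then PySem.List.slice items none (some desired)
  else if (primary.length : Int) ≥ desired then PySem.List.slice primary none (some desired)
  else
    let rest := items.filter (fun it => !(primary.contains it))
    PySem.List.slice (primary ++ rest) none (some desired)

-- ===== PORT B =====
def filter_india_links_alt (items : List (List (String × String))) (desired : Int) : List (List (String × String)) :=
  PySem.List.slice
    (PySem.List.sorted items (fun it => !is_india_link (PySem.Dict.getD (PySem.Dict.mk it) "url" "")) false)
    none (some desired)

-- ===== PRECONDITION & SPEC =====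
-- Pre_ restricts desired to the natural domain of a count: a negative desired is not a meaningful
-- number of links to keep, and there A's result depends on which internal branch slices from the end.
def Pre_filter_india_links (items : List (List (String × String))) (desired : Int) : Prop := 0 ≤ desired
instance (items : List (List (String × String))) (desired : Int) : Decidable (Pre_filter_india_links items desired) := by unfold Pre_filter_india_links; infer_instance

def pvWitness_filter_india_links : (List (List (String × String))) × Int := ([[("url", "a.gov.in/x")], [("url", "z")]], 1)

def Spec_filter_india_links (items : List (List (String × String))) (desired : Int) (out : List (List (String × String))) : Prop := out = filter_india_links_alt items desired
instance (items : List (List (String × String))) (desired : Int) (out : List (List (String × String))) : Decidable (Spec_filter_india_links items desired out) := by unfold Spec_filter_india_links; infer_instance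

-- ===== CLAIM (what is proved, stated in full; the proofs are below) =====
def Claim_equal_filter_india_links : Prop := ∀ (items : List (List (String × String))) (desired : Int), Dom_filter_india_links items desired → Pre_filter_india_links items desired → Spec_filter_india_links items desired (filter_india_links items desired)

-- ===== LEMMAS AND PROOFS =====

-- Inserting behind a prefix none of whose elements x goes before.
theorem insertBy_append_left {α : Type} (before : α → α → Bool) (x : α) (L1 L2 : List α)
    (h : ∀ y ∈ L1, before x y = false) :
    PySem.List.insertBy before x (L1 ++ L2) = L1 ++ PySem.List.insertBy before x L2 := by
  induction L1 with
  | nil => rfl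
  | cons a l ih =>
      have ha : before x a = false := h a (by simp)
      simp [PySem.List.insertBy, ha, ih (fun y hy => h y (by simp [hy]))]

-- The stable sort on the boolean key (!p) is exactly the partition: p-elements first, in order.
theorem sorted_not_partition {α : Type} (p : α → Bool) (xs : List α) :
    PySem.List.sorted xs (fun x => !p x) false
      = xs.filter p ++ xs.filter (fun x => !p x) := by
  induction xs using List.reverseRecOn with
  | nil => rfl
  | append_singleton xs x ih =>
      rw [PySem.List.sorted_eq_foldl_insertBy, List.foldl_append,
          ← PySem.List.sorted_eq_foldl_insertBy, ih]
      simp only [List.foldl_cons, List.foldl_nil, List.filter_append, List.filter_cons,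
        List.filter_nil]
      by_cases hx : p x = true
      · have h1 : ∀ y ∈ xs.filter p, (decide ((!p x) < (!p y))) = false := by
          intro y hy
          have : p y = true := (List.mem_filter.mp hy).2
          simp [hx, this]
        rw [insertBy_append_left _ _ _ _ h1]
        simp only [hx, Bool.not_true]
        cases hF : xs.filter (fun x => !p x) with
        | nil => simp [PySem.List.insertBy]
        | cons z zs =>
            have hz : p z = false := by
              have : z ∈ xs.filter (fun x => !p x) := by rw [hF]; simp
              have := (List.mem_filter.mp this).2
              simpa using this
            simp [PySem.List.insertBy, hx, hz]
      · have hx' : p x = false := by simpa using hx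
        have h0 : ∀ y ∈ xs.filter p ++ xs.filter (fun x => !p x),
            (decide ((!p x) < (!p y))) = false := by
          intro y _
          simp [hx']
        rw [PySem.List.insertBy_of_forall_not_before _ _ _ h0]
        simp [hx']

theorem filter_p_of_primary_nil {α : Type} (p : α → Bool) (xs : List α)
    (h : xs.filter p = []) : xs.filter (fun x => !p x) = xs := by
  rw [List.filter_eq_self]
  intro a ha
  have := List.filter_eq_nil_iff.mp h a ha
  simpa using this

theorem rest_eq_filter_not {α : Type} [BEq α] [LawfulBEq α] (p : α → Bool) (xs : List α) :
    xs.filter (fun it => !((xs.filter p).contains it)) = xs.filter (fun x => !p x) := by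
  apply List.filter_congr
  intro a ha
  by_cases hp : p a = true
  · have : a ∈ xs.filter p := List.mem_filter.mpr ⟨ha, hp⟩
    simp [hp, this]
  · have : a ∉ xs.filter p := by
      intro hmem
      exact hp (List.mem_filter.mp hmem).2
    simp [hp, this]

-- ===== VERDICT (by name: the statement is the Claim_ definition above) =====
theorem filter_india_links_spec : Claim_equal_filter_india_links := by
  intro items desired _ hPre
  unfold Spec_filter_india_links filter_india_links filter_india_links_alt
  have hPre' : (0:Int) ≤ desired := hPre
  set p : List (String × String) → Bool := fun it => is_india_link (PySem.Dict.getD (PySem.Dict.mk it) "url" "") with hp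
  rw [sorted_not_partition p items]
  simp only
  split_ifs with h1 h2
  · -- primary empty: sorted list = items
    have hnil : items.filter p = [] := by simpa [List.isEmpty_iff] using h1
    rw [hnil, List.nil_append, filter_p_of_primary_nil p items hnil]
  · -- enough primary: slice of primary = slice of the concatenation
    rw [PySem.List.slice_to _ hPre', PySem.List.slice_to _ hPre']
    rw [List.take_append_of_le_length]
    omega
  · -- fallback: the concatenations coincide
    rw [rest_eq_filter_not p items]
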